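-- pv_equiv track=rewrite | github.com/siriChiu/Poly-Trader | execution/control_plane.py | _active_or_latest_run_by_profile
-- ===== SOURCE A (Python) =====
-- from typing import Any, Dict, Iterable, List, Optional
--
-- def _run_priority(state: Optional[str]) -> int:
--     normalized = str(state or "").lower()
--     if normalized == "running":
--         return 0
--     if normalized == "paused":
--         return 1
--     return 2
--
-- def _active_or_latest_run_by_profile(runs: Iterable[Dict[str, Any]]) -> Dict[str, Dict[str, Any]]:
--     selected: Dict[str, Dict[str, Any]] = {}
--     for row in runs:
--         profile_id = str(row.get("profile_id") or "").strip()
--         if not profile_id: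
--             continue
--         existing = selected.get(profile_id)
--         if existing is None:
--             selected[profile_id] = row
--             continue
--         current_priority = _run_priority(row.get("state"))
--         existing_priority = _run_priority(existing.get("state"))
--         if current_priority < existing_priority:
--             selected[profile_id] = row
--             continue
--         if current_priority == existing_priority and str(row.get("updated_at") or "") > str(existing.get("updated_at") or ""):
--             selected[profile_id] = row
--     return selected
-- ===== SOURCE B (Python) =====
-- # B: group-first-then-reduce — one pass groups rows by stripped profile_id, a second
-- # pass reduces each group to its best row; alternative decomposition of A's running-best scan.
-- from typing import Any, Dict, Iterable, List, Optional
--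
-- def _run_priority(state: Optional[str]) -> int:
--     normalized = str(state or "").lower()
--     if normalized == "running":
--         return 0
--     if normalized == "paused":
--         return 1
--     return 2
--
-- def _better(row: Dict[str, Any], best: Dict[str, Any]) -> bool:
--     rp = _run_priority(row.get("state"))
--     bp = _run_priority(best.get("state"))
--     if rp != bp:
--         return rp < bp
--     return str(row.get("updated_at") or "") > str(best.get("updated_at") or "")
--
-- def _active_or_latest_run_by_profile(runs: Iterable[Dict[str, Any]]) -> Dict[str, Dict[str, Any]]:
--     groups: Dict[str, List[Dict[str, Any]]] = {}
--     for row in runs: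
--         profile_id = str(row.get("profile_id") or "").strip()
--         if profile_id:
--             groups.setdefault(profile_id, []).append(row)
--     result: Dict[str, Dict[str, Any]] = {}
--     for profile_id, rows in groups.items():
--         best = rows[0]
--         for row in rows[1:]:
--             if _better(row, best):
--                 best = row
--         result[profile_id] = best
--     return result
-- ===== Notes on version B (the rewrite author's own statement) =====
-- stated objective: alternative
-- what changed: B groups rows by stripped profile_id into a dict of lists in one pass and then reduces each group to its best row in a second pass, instead of A's single scan that keeps a running best per profile in the result dict.
import Mathlib
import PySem

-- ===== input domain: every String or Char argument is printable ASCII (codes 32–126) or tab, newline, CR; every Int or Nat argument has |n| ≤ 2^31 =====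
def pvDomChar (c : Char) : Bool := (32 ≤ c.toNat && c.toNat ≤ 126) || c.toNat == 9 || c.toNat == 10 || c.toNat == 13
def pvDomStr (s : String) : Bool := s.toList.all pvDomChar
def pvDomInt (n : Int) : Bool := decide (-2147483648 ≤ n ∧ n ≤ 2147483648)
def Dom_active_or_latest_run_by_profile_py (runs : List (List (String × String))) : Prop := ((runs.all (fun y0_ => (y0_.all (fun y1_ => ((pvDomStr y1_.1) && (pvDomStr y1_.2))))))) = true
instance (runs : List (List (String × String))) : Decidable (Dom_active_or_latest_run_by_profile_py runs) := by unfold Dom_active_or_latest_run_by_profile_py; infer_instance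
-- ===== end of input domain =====

-- B groups rows by stripped profile_id and then reduces each group to its best row,
-- instead of A's single running-best scan; same cost, different decomposition.


-- ===== PORT A =====
-- row.get(key) on a row dict (assoc list, first match)
def rowGet (row : List (String × String)) (key : String) : Option String :=
  (PySem.Dict.mk row).get? key

-- _run_priority(state); 'str(state or "")' sends None and "" both to "" = (·.getD "")
def run_priority_py (state : Option String) : Int :=
  let normalized := PySem.Str.lower (state.getD "")
  if normalized = "running" then 0
  else if normalized = "paused" then 1
  else 2

def active_or_latest_run_by_profile_py (runs : List (List (String × String))) : List (String × List (String × String)) :=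
  (runs.foldl (fun selected row =>
      let profile_id := PySem.Str.strip ((rowGet row "profile_id").getD "")
      if profile_id = "" then selected
      else
        match selected.get? profile_id with
        | none => selected.insert profile_id row
        | some existing =>
          let current_priority := run_priority_py (rowGet row "state")
          let existing_priority := run_priority_py (rowGet existing "state")
          if current_priority < existing_priority then
            selected.insert profile_id row
          else if current_priority = existing_priority ∧
              (rowGet existing "updated_at").getD "" < (rowGet row "updated_at").getD "" then
            selected.insert profile_id row
          else selected)
    (PySem.Dict.empty)).items

-- ===== PORT B =====
-- _better(row, best): row strictly better than best (lower priority, then later updated_at)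
def better_run (row best : List (String × String)) : Bool :=
  let rp := run_priority_py (rowGet row "state")
  let bp := run_priority_py (rowGet best "state")
  if rp ≠ bp then decide (rp < bp)
  else decide ((rowGet best "updated_at").getD "" < (rowGet row "updated_at").getD "")

-- the inner reduction of Source B: best = rows[0]; for row in rows[1:]: keep the better
def bestOf (rows : List (List (String × String))) : List (String × String) :=
  match rows with
  | [] => []
  | best :: rest => rest.foldl (fun best row => if better_run row best then row else best) best

def active_or_latest_run_by_profile_py_alt (runs : List (List (String × String))) : List (String × List (String × String)) :=
  let groups := runs.foldl (fun g row =>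
      let profile_id := PySem.Str.strip ((rowGet row "profile_id").getD "")
      if profile_id = "" then g
      else g.modify profile_id [] (· ++ [row]))
    (PySem.Dict.empty)
  (groups.items.foldl (fun result p => result.insert p.1 (bestOf p.2))
    (PySem.Dict.empty)).items

-- ===== PRECONDITION & SPEC =====
def Spec_active_or_latest_run_by_profile_py (runs : List (List (String × String))) (out : List (String × List (String × String))) : Prop := out = active_or_latest_run_by_profile_py_alt runs
instance (runs : List (List (String × String))) (out : List (String × List (String × String))) : Decidable (Spec_active_or_latest_run_by_profile_py runs out) := by unfold Spec_active_or_latest_run_by_profile_py; infer_instance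

-- ===== CLAIM (what is proved, stated in full; the proofs are below) =====
def Claim_equal_active_or_latest_run_by_profile_py : Prop := ∀ (runs : List (List (String × String))), Dom_active_or_latest_run_by_profile_py runs → Spec_active_or_latest_run_by_profile_py runs (active_or_latest_run_by_profile_py runs)

-- ===== LEMMAS AND PROOFS =====

-- the two loop bodies, named for the proofs (let-bindings inlined; definitionally the ports' lambdas)
def pvStepA (selected : PySem.Dict String (List (String × String))) (row : List (String × String)) :
    PySem.Dict String (List (String × String)) :=
  if PySem.Str.strip ((rowGet row "profile_id").getD "") = "" then selected
  else
    match selected.get? (PySem.Str.strip ((rowGet row "profile_id").getD "")) with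
    | none => selected.insert (PySem.Str.strip ((rowGet row "profile_id").getD "")) row
    | some existing =>
      if run_priority_py (rowGet row "state") < run_priority_py (rowGet existing "state") then
        selected.insert (PySem.Str.strip ((rowGet row "profile_id").getD "")) row
      else if run_priority_py (rowGet row "state") = run_priority_py (rowGet existing "state") ∧
          (rowGet existing "updated_at").getD "" < (rowGet row "updated_at").getD "" then
        selected.insert (PySem.Str.strip ((rowGet row "profile_id").getD "")) row
      else selected

def pvStepB (g : PySem.Dict String (List (List (String × String)))) (row : List (String × String)) :
    PySem.Dict String (List (List (String × String))) :=
  if PySem.Str.strip ((rowGet row "profile_id").getD "") = "" then g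
  else g.modify (PySem.Str.strip ((rowGet row "profile_id").getD "")) [] (· ++ [row])

lemma portA_eq_foldl (runs : List (List (String × String))) :
    active_or_latest_run_by_profile_py runs = (runs.foldl pvStepA PySem.Dict.empty).items := rfl

lemma portB_eq_foldl (runs : List (List (String × String))) :
    active_or_latest_run_by_profile_py_alt runs =
      ((runs.foldl pvStepB PySem.Dict.empty).items.foldl
        (fun result p => result.insert p.1 (bestOf p.2)) PySem.Dict.empty).items := rfl

-- map over the values of a dict
def pvMapVal {κ ν ω : Type} (f : ν → ω) (d : PySem.Dict κ ν) : PySem.Dict κ ω :=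
  PySem.Dict.mk (d.items.map (fun p => (p.1, f p.2)))

lemma get?_pvMapVal {κ ν ω : Type} [BEq κ] (f : ν → ω) (d : PySem.Dict κ ν) (k : κ) :
    (pvMapVal f d).get? k = (d.get? k).map f := by
  simp [pvMapVal, PySem.Dict.get?, List.find?_map, Function.comp_def, Option.map_map]

lemma contains_pvMapVal {κ ν ω : Type} [BEq κ] (f : ν → ω) (d : PySem.Dict κ ν) (k : κ) :
    (pvMapVal f d).contains k = d.contains k := by
  rw [PySem.Dict.contains_eq_isSome_get?, PySem.Dict.contains_eq_isSome_get?, get?_pvMapVal]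
  cases d.get? k <;> rfl

lemma keys_pvMapVal {κ ν ω : Type} (f : ν → ω) (d : PySem.Dict κ ν) :
    (pvMapVal f d).keys = d.keys := by
  simp [pvMapVal, PySem.Dict.keys]

lemma insert_pvMapVal {κ ν ω : Type} [BEq κ] (f : ν → ω) (d : PySem.Dict κ ν) (k : κ) (v : ν) :
    (pvMapVal f d).insert k (f v) = pvMapVal f (d.insert k v) := by
  unfold PySem.Dict.insert
  rw [contains_pvMapVal]
  split
  · apply PySem.Dict.ext
    simp only [pvMapVal, List.map_map]
    apply List.map_congr_left
    intro p _
    by_cases h : (p.1 == k) = true <;> simp [h]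
  · apply PySem.Dict.ext
    simp [pvMapVal]

lemma mem_values_of_get? {κ ν : Type} [BEq κ] (d : PySem.Dict κ ν) (k : κ) (v : ν)
    (h : d.get? k = some v) : v ∈ d.values := by
  unfold PySem.Dict.get? at h
  cases hf : d.items.find? (fun p => p.1 == k) with
  | none => rw [hf] at h; simp at h
  | some p =>
    rw [hf] at h
    simp only [Option.map_some, Option.some.injEq] at h
    exact h ▸ List.mem_map_of_mem (List.mem_of_find?_eq_some hf)

-- replacing the unique pair whose key matches by itself is the identity
lemma map_ite_self {κ ν : Type} [BEq κ] [LawfulBEq κ] (k : κ) (v : ν) :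
    ∀ (l : List (κ × ν)), (l.map (fun p => p.1)).Nodup →
      (l.find? (fun p => p.1 == k)).map (fun p => p.2) = some v →
      l.map (fun p => if (p.1 == k) = true then (k, v) else p) = l := by
  intro l
  induction l with
  | nil => intro _ h; simp at h
  | cons p rest ih =>
    intro hnd h
    simp only [List.map_cons, List.nodup_cons] at hnd
    by_cases hp : (p.1 == k) = true
    · have hfind : List.find? (fun q : κ × ν => q.1 == k) (p :: rest) = some p :=
        List.find?_cons_of_pos hp
      rw [hfind] at h
      simp only [Option.map_some, Option.some.injEq] at h
      have hk : p.1 = k := eq_of_beq hp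
      have hrest : rest.map (fun q => if (q.1 == k) = true then (k, v) else q) = rest := by
        conv_rhs => rw [← List.map_id rest]
        apply List.map_congr_left
        intro q hq
        have hqk : q.1 ≠ k := by
          intro hqk
          apply hnd.1
          rw [hk, ← hqk]
          exact List.mem_map_of_mem hq
        simp [hqk]
      rw [List.map_cons, hrest, if_pos hp, ← h, ← hk]
    · have hfind : List.find? (fun q : κ × ν => q.1 == k) (p :: rest) =
          List.find? (fun q : κ × ν => q.1 == k) rest :=
        List.find?_cons_of_neg (by simpa using hp)
      rw [hfind] at h
      rw [List.map_cons, if_neg hp, ih hnd.2 h]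

lemma insert_self_of_get? {κ ν : Type} [BEq κ] [LawfulBEq κ] (d : PySem.Dict κ ν) (k : κ) (v : ν)
    (hnd : d.keys.Nodup) (h : d.get? k = some v) : d.insert k v = d := by
  unfold PySem.Dict.insert
  rw [PySem.Dict.contains_eq_isSome_get?, h]
  simp only [Option.isSome_some, if_true]
  apply PySem.Dict.ext
  exact map_ite_self k v d.items hnd h

-- A's branch chain equals "replace iff _better(row, existing)"
lemma stepA_chain (s : PySem.Dict String (List (String × String)))
    (pid : String) (row existing : List (String × String)) :
    (if run_priority_py (rowGet row "state") < run_priority_py (rowGet existing "state") then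
        s.insert pid row
      else if run_priority_py (rowGet row "state") = run_priority_py (rowGet existing "state") ∧
          (rowGet existing "updated_at").getD "" < (rowGet row "updated_at").getD "" then
        s.insert pid row
      else s) =
    (if better_run row existing then s.insert pid row else s) := by
  unfold better_run
  by_cases hlt : run_priority_py (rowGet row "state") < run_priority_py (rowGet existing "state")
  · have hne : run_priority_py (rowGet row "state") ≠ run_priority_py (rowGet existing "state") := by omega
    simp [hlt, hne]
  · by_cases heq : run_priority_py (rowGet row "state") = run_priority_py (rowGet existing "state")
    · simp [heq]
    · simp [hlt, heq]

-- one step of the two loops, related through pvMapVal bestOf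
lemma step_eq (g : PySem.Dict String (List (List (String × String))))
    (row : List (String × String))
    (hnd : g.keys.Nodup) (hne : ∀ v ∈ g.values, v ≠ []) :
    pvStepA (pvMapVal bestOf g) row = pvMapVal bestOf (pvStepB g row) := by
  unfold pvStepA pvStepB PySem.Dict.modify
  by_cases hpid : PySem.Str.strip ((rowGet row "profile_id").getD "") = ""
  · rw [if_pos hpid, if_pos hpid]
  · rw [if_neg hpid, if_neg hpid, get?_pvMapVal, PySem.Dict.getD_eq_get?_getD]
    cases hg : g.get? (PySem.Str.strip ((rowGet row "profile_id").getD "")) with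
    | none =>
      simp only [Option.map_none, Option.getD_none, List.nil_append]
      exact insert_pvMapVal bestOf g _ [row]
    | some rows =>
      obtain ⟨b, rest, rfl⟩ : ∃ b rest, rows = b :: rest := by
        cases rows with
        | nil => exact absurd rfl (hne _ (mem_values_of_get? g _ [] hg))
        | cons b rest => exact ⟨b, rest, rfl⟩
      simp only [Option.map_some, Option.getD_some]
      have hbest : bestOf ((b :: rest) ++ [row]) =
          if better_run row (bestOf (b :: rest)) then row else bestOf (b :: rest) := by
        simp only [bestOf, List.cons_append, List.foldl_append, List.foldl_cons, List.foldl_nil]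
      calc (if run_priority_py (rowGet row "state") <
              run_priority_py (rowGet (bestOf (b :: rest)) "state") then
              (pvMapVal bestOf g).insert (PySem.Str.strip ((rowGet row "profile_id").getD "")) row
            else if run_priority_py (rowGet row "state") =
                run_priority_py (rowGet (bestOf (b :: rest)) "state") ∧
                (rowGet (bestOf (b :: rest)) "updated_at").getD "" <
                  (rowGet row "updated_at").getD "" then
              (pvMapVal bestOf g).insert (PySem.Str.strip ((rowGet row "profile_id").getD "")) row
            else pvMapVal bestOf g)
          = (if better_run row (bestOf (b :: rest)) then
              (pvMapVal bestOf g).insert (PySem.Str.strip ((rowGet row "profile_id").getD "")) row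
            else pvMapVal bestOf g) := stepA_chain _ _ _ _
        _ = pvMapVal bestOf
              (g.insert (PySem.Str.strip ((rowGet row "profile_id").getD ""))
                ((b :: rest) ++ [row])) := by
            rw [← insert_pvMapVal, hbest]
            by_cases hb : better_run row (bestOf (b :: rest)) = true
            · rw [if_pos hb, if_pos hb]
            · rw [if_neg hb, if_neg hb]
              exact (insert_self_of_get? _ _ _ (by rw [keys_pvMapVal]; exact hnd)
                (by rw [get?_pvMapVal, hg]; rfl)).symm

lemma stepB_nodup (g : PySem.Dict String (List (List (String × String))))
    (row : List (String × String)) (hnd : g.keys.Nodup) : (pvStepB g row).keys.Nodup := by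
  unfold pvStepB PySem.Dict.modify
  by_cases h : PySem.Str.strip ((rowGet row "profile_id").getD "") = ""
  · rw [if_pos h]; exact hnd
  · rw [if_neg h]; exact PySem.Dict.nodup_keys_insert _ _ _ hnd

lemma stepB_nonempty (g : PySem.Dict String (List (List (String × String))))
    (row : List (String × String)) (hne : ∀ v ∈ g.values, v ≠ []) :
    ∀ v ∈ (pvStepB g row).values, v ≠ [] := by
  unfold pvStepB PySem.Dict.modify
  by_cases h : PySem.Str.strip ((rowGet row "profile_id").getD "") = ""
  · rw [if_pos h]; exact hne
  · rw [if_neg h]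
    intro v hv
    rcases PySem.Dict.mem_values_insert _ _ _ _ hv with h' | h'
    · rw [h']; simp
    · exact hne v h'

lemma loop_eq (runs : List (List (String × String))) :
    ∀ g : PySem.Dict String (List (List (String × String))),
      g.keys.Nodup → (∀ v ∈ g.values, v ≠ []) →
      runs.foldl pvStepA (pvMapVal bestOf g) = pvMapVal bestOf (runs.foldl pvStepB g)
      ∧ (runs.foldl pvStepB g).keys.Nodup := by
  induction runs with
  | nil => exact fun g hnd _ => ⟨rfl, hnd⟩
  | cons row rs ih =>
    intro g hnd hne
    simp only [List.foldl_cons]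
    rw [step_eq g row hnd hne]
    exact ih (pvStepB g row) (stepB_nodup g row hnd) (stepB_nonempty g row hne)

-- ===== VERDICT (by name: the statement is the Claim_ definition above) =====
theorem active_or_latest_run_by_profile_py_spec : Claim_equal_active_or_latest_run_by_profile_py := by
  intro runs _
  show active_or_latest_run_by_profile_py runs = active_or_latest_run_by_profile_py_alt runs
  rw [portA_eq_foldl, portB_eq_foldl]
  obtain ⟨heq, hnd⟩ := loop_eq runs PySem.Dict.empty
    (by simp [PySem.Dict.keys, PySem.Dict.empty])
    (by intro v hv; simp [PySem.Dict.values, PySem.Dict.empty] at hv)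
  have heq' : runs.foldl pvStepA PySem.Dict.empty =
      pvMapVal bestOf (runs.foldl pvStepB PySem.Dict.empty) := heq
  rw [heq']
  rw [PySem.Dict.items_foldl_insert_fresh (k := fun p => p.1) (v := fun p => bestOf p.2)
    (d := PySem.Dict.empty) (l := (runs.foldl pvStepB PySem.Dict.empty).items)
    (by intro a _; exact PySem.Dict.contains_empty _) hnd]
  simp [pvMapVal, PySem.Dict.empty]
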